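-- pv_equiv track=rewrite | github.com/Andndre/paibot | utils/string.py | nth_word
-- ===== SOURCE A (Python) =====
-- def nth_word(sentence: str, n: int) -> str:
--   res = ''
--   for c in sentence:
--     if c == ' ':
--       n-=1
--       if n == 0: break
--       continue
--     if n == 1: res += c
--   return res
-- ===== SOURCE B (Python) =====
-- def nth_word(sentence: str, n: int) -> str:
--   words = sentence.split(' ')
--   return words[n - 1] if 1 <= n <= len(words) else ''
-- ===== Notes on version B (the rewrite author's own statement) =====
-- stated objective: faster
-- what changed: Replaced A's character-by-character countdown scan with in-loop accumulation and break by a single split(' ') followed by a bounds-checked index into the word list.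
import Mathlib
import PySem

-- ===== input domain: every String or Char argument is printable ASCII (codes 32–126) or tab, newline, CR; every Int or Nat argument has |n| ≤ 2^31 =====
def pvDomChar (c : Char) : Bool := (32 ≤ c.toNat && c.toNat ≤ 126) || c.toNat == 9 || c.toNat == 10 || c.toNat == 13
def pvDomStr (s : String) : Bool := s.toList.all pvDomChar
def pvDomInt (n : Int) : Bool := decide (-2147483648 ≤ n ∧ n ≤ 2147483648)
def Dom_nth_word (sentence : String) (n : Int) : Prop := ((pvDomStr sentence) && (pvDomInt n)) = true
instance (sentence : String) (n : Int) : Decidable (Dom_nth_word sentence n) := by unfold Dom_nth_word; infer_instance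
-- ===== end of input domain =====

-- B replaces A's counting scan (collect chars while n == 1, break at the word's end) by
-- split-on-space plus a bounds-checked index; objective: simpler. Exact equivalence, no Pre_.

-- ===== PORT A =====
-- A's for-loop with break/continue: structural recursion over the characters, state = (res, n).
-- res is kept as List Char and packed with String.ofList at return (res += c ↦ res ++ [c]); exact.
def nthWordGoA : List Char → List Char → Int → List Char
  | [], res, _ => res
  | c :: cs, res, n =>
    if c = ' ' then
      if n - 1 = 0 then res else nthWordGoA cs res (n - 1)
    else if n = 1 then nthWordGoA cs (res ++ [c]) n
    else nthWordGoA cs res n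

def nth_word (sentence : String) (n : Int) : String :=
  String.ofList (nthWordGoA sentence.toList [] n)

-- ===== PORT B =====
-- Source B: words = sentence.split(' '); words[n-1] if 1 <= n <= len(words) else ''.
-- Single-char split(' ') is List.splitOn ' ' on the code points (exact: keeps empty words).
def nth_word_alt (sentence : String) (n : Int) : String :=
  let words : List String := (sentence.toList.splitOn ' ').map String.ofList
  if 1 ≤ n ∧ n ≤ words.length then words.getD (n - 1).toNat "" else ""

-- ===== PRECONDITION & SPEC =====
def Spec_nth_word (sentence : String) (n : Int) (out : String) : Prop := out = nth_word_alt sentence n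
instance (sentence : String) (n : Int) (out : String) : Decidable (Spec_nth_word sentence n out) := by unfold Spec_nth_word; infer_instance

-- ===== CLAIM (what is proved, stated in full; the proofs are below) =====
def Claim_equal_nth_word : Prop := ∀ (sentence : String) (n : Int), Dom_nth_word sentence n → Spec_nth_word sentence n (nth_word sentence n)

-- ===== LEMMAS AND PROOFS =====

-- While n = 1 the loop appends the current word's characters to res and breaks at the
-- first space: it returns res ++ (first word of cs).
theorem nthWordGoA_one (cs res : List Char) :
    nthWordGoA cs res 1 = res ++ (cs.splitOn ' ').headD [] := by
  induction cs generalizing res with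
  | nil => simp [nthWordGoA, List.splitOn, List.splitOnP_nil]
  | cons c cs ih =>
    by_cases hc : c = ' '
    · simp [nthWordGoA, hc, List.splitOn, List.splitOnP_cons]
    · obtain ⟨w, ws, hw⟩ := List.exists_cons_of_ne_nil (List.splitOnP_ne_nil (· == ' ') cs)
      simp [nthWordGoA, hc, ih, List.splitOn, List.splitOnP_cons, hw]

-- Characterisation of A's loop from an empty accumulator: it is B's split-then-index.
theorem nthWordGoA_eq_split (cs : List Char) (n : Int) :
    nthWordGoA cs [] n =
      (if 1 ≤ n ∧ n ≤ (cs.splitOn ' ').length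
       then (cs.splitOn ' ').getD (n - 1).toNat [] else []) := by
  induction cs generalizing n with
  | nil =>
    simp only [nthWordGoA, List.splitOn, List.splitOnP_nil, List.length_cons,
      List.length_nil]
    split_ifs with h
    · have ht : (n - 1).toNat = 0 := by omega
      rw [ht]; rfl
    · rfl
  | cons c cs ih =>
    by_cases hc : c = ' '
    · by_cases h1 : n = 1
      · subst h1
        simp [nthWordGoA, hc, List.splitOn, List.splitOnP_cons]
      · have hrec : nthWordGoA (c :: cs) [] n = nthWordGoA cs [] (n - 1) := by
          simp only [nthWordGoA, hc, if_true]
          rw [if_neg (by omega)]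
        rw [hrec, ih]
        simp only [List.splitOn, List.splitOnP_cons, hc, beq_self_eq_true, if_true,
          List.length_cons]
        by_cases h2 : 1 ≤ n - 1 ∧ n - 1 ≤ ((List.splitOnP (· == ' ') cs)).length
        · rw [if_pos h2, if_pos (by omega)]
          have ht : (n - 1).toNat = (n - 1 - 1).toNat + 1 := by omega
          rw [ht]
          rfl
        · rw [if_neg h2, if_neg (by omega)]
    · have hne := List.exists_cons_of_ne_nil (List.splitOnP_ne_nil (· == ' ') cs)
      obtain ⟨w, ws, hw⟩ := hne
      by_cases h1 : n = 1
      · subst h1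
        have : nthWordGoA (c :: cs) [] 1 = nthWordGoA cs [c] 1 := by
          simp [nthWordGoA, hc]
        rw [this, nthWordGoA_one]
        simp [List.splitOn, List.splitOnP_cons, hc, hw]
      · have hrec : nthWordGoA (c :: cs) [] n = nthWordGoA cs [] n := by
          simp only [nthWordGoA]
          rw [if_neg hc, if_neg h1]
        rw [hrec, ih]
        simp only [List.splitOn, List.splitOnP_cons, beq_iff_eq, hc, if_false, hw,
          List.modifyHead, List.length_cons, Nat.cast_add, Nat.cast_one]
        by_cases h2 : 1 ≤ n ∧ n ≤ (ws.length : Int) + 1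
        · rw [if_pos h2, if_pos h2]
          have ht : (n - 1).toNat = (n - 1 - 1).toNat + 1 := by omega
          rw [ht]
          rfl
        · rw [if_neg h2, if_neg h2]

-- ===== VERDICT (by name: the statement is the Claim_ definition above) =====
theorem nth_word_spec : Claim_equal_nth_word := by
  intro sentence n _
  unfold Spec_nth_word nth_word nth_word_alt
  rw [nthWordGoA_eq_split]
  simp only [List.length_map]
  split_ifs with h
  · have : ("" : String) = String.ofList [] := rfl
    rw [this, List.getD_map]
  · rfl
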